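-- pv_equiv track=rewrite | github.com/sethpollen/sbp_linux_config | src/python/numformat.py | stripNonDigits
-- ===== SOURCE A (Python) =====
-- def stripNonDigits(text):
--   """ Strips non-digit characters from the beginning and end of text. """
--   begin = 0
--   end = len(text) - 1
--   while begin <= end and not text[begin].isdigit():
--     begin += 1
--   while begin <= end and not text[end].isdigit():
--     end -= 1
--   return text[begin:end+1]
-- ===== SOURCE B (Python) =====
-- def stripNonDigits(text):
--   """ Strips non-digit characters from the beginning and end of text. """
--   first = None
--   last = None
--   for i, c in enumerate(text):
--     if c.isdigit():
--       if first is None: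
--         first = i
--       last = i
--   if first is None:
--     return ''
--   return text[first:last+1]
-- ===== Notes on version B (the rewrite author's own statement) =====
-- stated objective: alternative
-- what changed: Replaced the two index-moving while loops (forward scan then backward scan with per-index text[i] lookups) by a single forward pass over enumerate(text) that records the first and most recent digit index, slicing once at the end.
import Mathlib
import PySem

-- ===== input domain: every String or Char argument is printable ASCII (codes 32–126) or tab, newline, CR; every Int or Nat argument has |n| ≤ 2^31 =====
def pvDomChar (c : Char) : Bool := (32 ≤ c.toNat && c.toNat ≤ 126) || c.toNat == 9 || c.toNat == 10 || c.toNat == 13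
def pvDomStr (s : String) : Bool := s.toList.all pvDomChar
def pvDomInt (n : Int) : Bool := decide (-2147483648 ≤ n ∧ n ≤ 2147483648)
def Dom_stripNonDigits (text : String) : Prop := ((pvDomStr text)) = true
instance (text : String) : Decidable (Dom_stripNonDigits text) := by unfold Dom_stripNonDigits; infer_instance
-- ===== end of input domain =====

-- B replaces A's two index-moving while loops by one forward pass over enumerate recording
-- first/last digit indices (objective: alternative decomposition, same O(n) cost).

-- ===== PORT A =====
-- "while begin <= end and not text[begin].isdigit(): begin += 1"
-- (inside the loop the index is always in range, so pyGetD's default is never read)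
def stripA_beginLoop (cs : List Char) (b e : Int) : Int :=
  if h : b ≤ e ∧ ¬ PySem.Chars.isdigit (PySem.List.pyGetD cs b ' ') = true then
    stripA_beginLoop cs (b + 1) e
  else b
termination_by (e + 1 - b).toNat
decreasing_by omega

-- "while begin <= end and not text[end].isdigit(): end -= 1"
def stripA_endLoop (cs : List Char) (b e : Int) : Int :=
  if h : b ≤ e ∧ ¬ PySem.Chars.isdigit (PySem.List.pyGetD cs e ' ') = true then
    stripA_endLoop cs b (e - 1)
  else e
termination_by (e + 1 - b).toNat
decreasing_by omega

def stripNonDigits (text : String) : String :=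
  let cs := text.toList
  let begin_ := stripA_beginLoop cs 0 ((cs.length : Int) - 1)
  let end_ := stripA_endLoop cs begin_ ((cs.length : Int) - 1)
  String.ofList (PySem.List.slice cs (some begin_) (some (end_ + 1)))

-- ===== PORT B =====
-- "for i, c in enumerate(text): if c.isdigit(): first = first if set else i; last = i"
def stripB_step (st : Option Int × Option Int) (p : Int × Char) : Option Int × Option Int :=
  if PySem.Chars.isdigit p.2 then ((if st.1 = none then some p.1 else st.1), some p.1) else st

def stripNonDigits_alt (text : String) : String :=
  let cs := text.toList
  let st := (PySem.List.enumerate cs 0).foldl stripB_step (none, none)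
  match st.1 with
  | none => ""
  | some first => String.ofList (PySem.List.slice cs (some first) (some ((st.2.getD first) + 1)))

-- ===== PRECONDITION & SPEC =====
def Spec_stripNonDigits (text : String) (out : String) : Prop := out = stripNonDigits_alt text
instance (text : String) (out : String) : Decidable (Spec_stripNonDigits text out) := by unfold Spec_stripNonDigits; infer_instance

-- ===== CLAIM (what is proved, stated in full; the proofs are below) =====
def Claim_equal_stripNonDigits : Prop := ∀ (text : String), Dom_stripNonDigits text → Spec_stripNonDigits text (stripNonDigits text)

-- ===== LEMMAS AND PROOFS =====

-- index of the first digit of a list, if any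
def firstIdx? : List Char → Option Nat
  | [] => none
  | c :: t => if PySem.Chars.isdigit c then some 0 else (firstIdx? t).map (· + 1)

-- index of the last digit of a list, if any
def lastIdx? : List Char → Option Nat
  | [] => none
  | c :: t =>
    match lastIdx? t with
    | some j => some (j + 1)
    | none => if PySem.Chars.isdigit c then some 0 else none

theorem firstIdx?_eq_none_iff (cs : List Char) : firstIdx? cs = none ↔ lastIdx? cs = none := by
  induction cs with
  | nil => simp [firstIdx?, lastIdx?]
  | cons c t ih =>
    simp only [firstIdx?, lastIdx?]
    cases h : lastIdx? t with
    | none =>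
      rw [h] at ih
      split_ifs with hc <;> simp [ih]
    | some j =>
      have : firstIdx? t ≠ none := fun hn => by simp [ih.mp hn] at h
      cases hf : firstIdx? t with
      | none => exact absurd hf this
      | some f => split_ifs <;> simp

-- the first-digit index really points at a digit inside the list
theorem firstIdx?_spec (cs : List Char) (f : Nat) (h : firstIdx? cs = some f) :
    f < cs.length ∧ PySem.Chars.isdigit (cs.getD f ' ') = true := by
  induction cs generalizing f with
  | nil => simp [firstIdx?] at h
  | cons c t ih =>
    simp only [firstIdx?] at h
    split_ifs at h with hc
    · cases h; simpa using hc
    · cases hf : firstIdx? t with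
      | none => simp [hf] at h
      | some f' =>
        simp [hf] at h
        obtain ⟨h1, h2⟩ := ih f' hf
        subst h
        constructor
        · simpa using h1
        · simpa using h2

-- appending one character updates the last-digit index at the right end
theorem lastIdx?_append_singleton (xs : List Char) (c : Char) :
    lastIdx? (xs ++ [c]) = if PySem.Chars.isdigit c then some xs.length else lastIdx? xs := by
  induction xs with
  | nil => simp [lastIdx?]
  | cons x t ih =>
    simp only [List.cons_append, lastIdx?, ih]
    split_ifs <;> cases lastIdx? t <;> simp

-- A's first while loop computes the first-digit index (or the length when there is none)
theorem beginLoop_eq (cs : List Char) :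
    ∀ n k, k ≤ cs.length → cs.length - k = n →
      stripA_beginLoop cs (k : Int) ((cs.length : Int) - 1) =
        (match firstIdx? (cs.drop k) with
         | some f => ((k + f : Nat) : Int)
         | none => (cs.length : Int)) := by
  intro n
  induction n with
  | zero =>
    intro k hk hn
    have hk' : k = cs.length := by omega
    subst hk'
    rw [stripA_beginLoop, dif_neg (by omega)]
    simp [List.drop_length, firstIdx?]
  | succ n ih =>
    intro k hk hn
    have hklt : k < cs.length := by omega
    have hdrop : cs.drop k = cs[k] :: cs.drop (k + 1) := List.drop_eq_getElem_cons hklt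
    have hget : PySem.List.pyGetD cs (k : Int) ' ' = cs[k] := by
      rw [PySem.List.pyGetD_natCast]; simp [List.getD_eq_getElem?_getD, hklt]
    by_cases hd : PySem.Chars.isdigit cs[k] = true
    · rw [stripA_beginLoop, dif_neg (by rw [hget]; simp [hd])]
      rw [hdrop]
      simp [firstIdx?, hd]
    · rw [stripA_beginLoop, dif_pos ⟨by omega, by rw [hget]; simp [hd]⟩]
      have : ((k : Int) + 1) = ((k + 1 : Nat) : Int) := by push_cast; ring
      rw [this, ih (k + 1) (by omega) (by omega)]
      rw [hdrop]
      simp only [firstIdx?, hd]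
      cases firstIdx? (cs.drop (k + 1)) with
      | none => simp
      | some v => simp only [Option.map_some]; push_cast; ring_nf

-- A's second while loop computes the last-digit index of the scanned prefix,
-- provided a digit sits at index f ≤ m
theorem endLoop_eq (cs : List Char) (f : Nat) (hf : f < cs.length)
    (hd : PySem.Chars.isdigit (cs.getD f ' ') = true) :
    ∀ m, f ≤ m → m < cs.length →
      stripA_endLoop cs (f : Int) (m : Int) = (((lastIdx? (cs.take (m + 1))).getD 0 : Nat) : Int) := by
  intro m
  induction m with
  | zero =>
    intro hfm hm
    have hf0 : f = 0 := by omega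
    subst hf0
    rw [stripA_endLoop, dif_neg (by
      intro hcon
      apply hcon.2
      rw [PySem.List.pyGetD_natCast]
      simpa using hd)]
    have : cs.take 1 = [] ++ [cs[0]] := by
      simp [List.take_add_one, List.getElem?_eq_getElem hm]
    rw [this, lastIdx?_append_singleton]
    have : PySem.Chars.isdigit cs[0] = true := by
      simpa [List.getD_eq_getElem?_getD, List.getElem?_eq_getElem hm] using hd
    simp [this]
  | succ m ih =>
    intro hfm hm
    have hsnoc : cs.take (m + 1 + 1) = cs.take (m + 1) ++ [cs[m + 1]] := by
      simp [List.take_add_one, List.getElem?_eq_getElem hm]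
    have hget : PySem.List.pyGetD cs ((m + 1 : Nat) : Int) ' ' = cs[m + 1] := by
      rw [PySem.List.pyGetD_natCast]; simp [List.getD_eq_getElem?_getD, hm]
    by_cases hdig : PySem.Chars.isdigit cs[m + 1] = true
    · rw [stripA_endLoop, dif_neg (by rw [hget]; simp [hdig])]
      rw [hsnoc, lastIdx?_append_singleton]
      simp [hdig, List.length_take, Nat.min_eq_left (by omega : m + 1 ≤ cs.length)]
    · have hne : f ≠ m + 1 := by
        intro hcon
        apply hdig
        subst hcon
        simpa [List.getD_eq_getElem?_getD, List.getElem?_eq_getElem hm] using hd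
      rw [stripA_endLoop, dif_pos ⟨by omega, by rw [hget]; simp [hdig]⟩]
      have harg : ((m + 1 : Nat) : Int) - 1 = ((m : Nat) : Int) := by push_cast; ring
      rw [harg, ih (by omega) (by omega)]
      rw [hsnoc, lastIdx?_append_singleton]
      simp [hdig]

-- B's single pass computes the same pair of indices
theorem foldB_eq (cs : List Char) :
    ∀ (s : Int) (st : Option Int × Option Int),
      (PySem.List.enumerate cs s).foldl stripB_step st =
        (match firstIdx? cs with
         | none => st
         | some f => ((if st.1 = none then some (s + f) else st.1),
                      some (s + ((lastIdx? cs).getD 0)))) := by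
  induction cs with
  | nil => intro s st; simp [PySem.List.enumerate_nil, firstIdx?]
  | cons c t ih =>
    intro s st
    rw [PySem.List.enumerate_cons, List.foldl_cons, ih]
    by_cases hd : PySem.Chars.isdigit c = true
    · have hst : stripB_step st (s, c) = ((if st.1 = none then some s else st.1), some s) := by
        simp [stripB_step, hd]
      rw [hst]
      simp only [firstIdx?, hd, if_pos]
      cases hft : firstIdx? t with
      | none =>
        have hlt : lastIdx? t = none := (firstIdx?_eq_none_iff t).mp hft
        simp [lastIdx?, hlt, hd]
      | some f' =>
        obtain ⟨l', hl'⟩ : ∃ l', lastIdx? t = some l' := by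
          cases h : lastIdx? t with
          | none => exact absurd hft (by simp [(firstIdx?_eq_none_iff t).mpr h])
          | some l => exact ⟨l, rfl⟩
        simp only [lastIdx?, hl', Option.getD_some, Prod.mk.injEq]
        constructor
        · by_cases h1 : st.1 = none <;> simp [h1]
        · congr 1; push_cast; ring
    · have hst : stripB_step st (s, c) = st := by simp [stripB_step, hd]
      rw [hst]
      have hd' : PySem.Chars.isdigit c = false := by simpa using hd
      simp only [firstIdx?, hd', lastIdx?, Bool.false_eq_true, if_false]
      cases hft : firstIdx? t with
      | none => simp
      | some f' =>
        obtain ⟨l', hl'⟩ : ∃ l', lastIdx? t = some l' := by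
          cases h : lastIdx? t with
          | none => exact absurd hft (by simp [(firstIdx?_eq_none_iff t).mpr h])
          | some l => exact ⟨l, rfl⟩
        simp only [hl', Option.map_some, Option.getD_some, Prod.mk.injEq]
        refine ⟨?_, by congr 1; push_cast; ring⟩
        by_cases h1 : st.1 = none
        · simp only [h1, if_true]; congr 1; push_cast; ring
        · simp [h1]

-- ===== VERDICT (by name: the statement is the Claim_ definition above) =====
theorem stripNonDigits_spec : Claim_equal_stripNonDigits := by
  intro text _
  simp only [Spec_stripNonDigits, stripNonDigits, stripNonDigits_alt]
  generalize text.toList = cs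
  rw [foldB_eq cs 0 (none, none)]
  have hb := beginLoop_eq cs (cs.length - 0) 0 (by omega) rfl
  simp only [List.drop_zero, Nat.zero_add, Nat.cast_zero] at hb
  cases hf : firstIdx? cs with
  | none =>
    have hl : lastIdx? cs = none := (firstIdx?_eq_none_iff cs).mp hf
    rw [hf] at hb
    simp only at hb
    simp only []
    rw [hb]
    rw [stripA_endLoop, dif_neg (by omega)]
    have : (cs.length : Int) - 1 + 1 = ((cs.length : Nat) : Int) := by ring
    rw [this, PySem.List.slice_natCast]
    simp [List.drop_length]
  | some f =>
    obtain ⟨hflt, hfd⟩ := firstIdx?_spec cs f hf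
    obtain ⟨l, hl⟩ : ∃ l, lastIdx? cs = some l := by
      cases h : lastIdx? cs with
      | none => exact absurd hf (by simp [(firstIdx?_eq_none_iff cs).mpr h])
      | some l => exact ⟨l, rfl⟩
    rw [hf] at hb
    simp only at hb
    simp only [hl]
    have hlen : 0 < cs.length := lt_of_le_of_lt (Nat.zero_le f) hflt
    have hm1 : ((cs.length : Int) - 1) = ((cs.length - 1 : Nat) : Int) := by omega
    have he := endLoop_eq cs f hflt hfd (cs.length - 1) (by omega) (by omega)
    rw [Nat.sub_add_cancel hlen, List.take_length] at he
    rw [hb, hm1, he, hl]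
    simp
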